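-- pv_equiv track=rewrite | github.com/dev-yaroslav-b/teletube-bot | bot/helpers.py | hours_minutes_seconds_to_milliseconds
-- ===== SOURCE A (Python) =====
-- def hours_minutes_seconds_to_milliseconds(milliseconds: int, time_code: list):
--     """
--     Convert hours, minutes, seconds to milliseconds
--     1 second - 1000 mils | 1 minute = 60 000 mils | 3 600 000 000 mils
--     :param milliseconds: current milliseconds
--     :param time_code: list of time codes
--     :return: milliseconds
--     """
--     if len(time_code) == 0:
--         return milliseconds
--     elif len(time_code) == 1:
--         milliseconds += time_code[0] * 1000
--         time_code.pop(0)
--         return hours_minutes_seconds_to_milliseconds(milliseconds, time_code)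
--     else:
--         milliseconds += time_code[0] * 60000
--         time_code.pop(0)
--         return hours_minutes_seconds_to_milliseconds(milliseconds, time_code)
-- ===== SOURCE B (Python) =====
-- def hours_minutes_seconds_to_milliseconds(milliseconds: int, time_code: list):
--     """Iterative back-to-front: pop the last element first (*1000 as seconds),
--     then drain the rest as minutes (*60000). Empties time_code like A does."""
--     if time_code:
--         milliseconds += time_code.pop() * 1000
--         while time_code:
--             milliseconds += time_code.pop() * 60000
--     return milliseconds
-- ===== Notes on version B (the rewrite author's own statement) =====
-- stated objective: simpler
-- what changed: Replaces A's front-popping tail recursion (with a len==1 branch decided on every call) by an iterative back-to-front drain: pop the last element once as seconds, then loop popping the remaining elements as minutes; same return value and same mutation (time_code ends empty).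
import Mathlib
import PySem

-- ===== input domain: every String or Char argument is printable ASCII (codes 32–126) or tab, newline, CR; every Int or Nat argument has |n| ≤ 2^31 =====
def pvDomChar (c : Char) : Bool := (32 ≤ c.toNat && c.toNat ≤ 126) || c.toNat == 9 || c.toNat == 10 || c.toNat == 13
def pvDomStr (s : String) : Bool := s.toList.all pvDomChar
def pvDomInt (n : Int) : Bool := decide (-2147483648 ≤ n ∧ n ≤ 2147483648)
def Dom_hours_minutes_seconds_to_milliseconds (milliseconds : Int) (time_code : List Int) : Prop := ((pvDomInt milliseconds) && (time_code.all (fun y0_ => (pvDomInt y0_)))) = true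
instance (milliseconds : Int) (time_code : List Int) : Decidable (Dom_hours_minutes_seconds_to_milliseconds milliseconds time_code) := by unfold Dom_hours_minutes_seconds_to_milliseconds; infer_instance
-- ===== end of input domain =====

-- ===== PORT A =====
def hours_minutes_seconds_to_milliseconds (milliseconds : Int) (time_code : List Int) : Int :=
  match time_code with
  | [] => milliseconds
  | [x] => hours_minutes_seconds_to_milliseconds (milliseconds + x * 1000) []
  | x :: y :: rest => hours_minutes_seconds_to_milliseconds (milliseconds + x * 60000) (y :: rest)

-- ===== PORT B =====
-- B pops from the END: last element * 1000 first, then the remaining elements in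
-- reverse order * 60000 each (a fold over time_code.dropLast.reverse mirrors the pop() loop).
def hours_minutes_seconds_to_milliseconds_alt (milliseconds : Int) (time_code : List Int) : Int :=
  match time_code.getLast? with
  | none => milliseconds
  | some last =>
      (time_code.dropLast.reverse).foldl (fun acc x => acc + x * 60000) (milliseconds + last * 1000)

-- ===== PRECONDITION & SPEC =====
def Spec_hours_minutes_seconds_to_milliseconds (milliseconds : Int) (time_code : List Int) (out : Int) : Prop := out = hours_minutes_seconds_to_milliseconds_alt milliseconds time_code
instance (milliseconds : Int) (time_code : List Int) (out : Int) : Decidable (Spec_hours_minutes_seconds_to_milliseconds milliseconds time_code out) := by unfold Spec_hours_minutes_seconds_to_milliseconds; infer_instance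

-- ===== CLAIM (what is proved, stated in full; the proofs are below) =====
def Claim_equal_hours_minutes_seconds_to_milliseconds : Prop := ∀ (milliseconds : Int) (time_code : List Int), Dom_hours_minutes_seconds_to_milliseconds milliseconds time_code → Spec_hours_minutes_seconds_to_milliseconds milliseconds time_code (hours_minutes_seconds_to_milliseconds milliseconds time_code)

-- ===== LEMMAS AND PROOFS =====

-- the *60000 drain shifts the accumulator by the (order-independent) sum
lemma alt_fold_shift (s : Int) (l : List Int) :
    l.foldl (fun acc x => acc + x * 60000) s = s + (l.map (fun x => x * 60000)).sum := by
  induction l generalizing s with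
  | nil => simp
  | cons h t ih => simp [List.foldl_cons, ih, add_assoc]

-- peeling the head of a two-or-more element list off B's drain matches A's first recursive step
lemma alt_cons_cons (ms x y : Int) (r : List Int) :
    hours_minutes_seconds_to_milliseconds_alt ms (x :: y :: r) =
      hours_minutes_seconds_to_milliseconds_alt (ms + x * 60000) (y :: r) := by
  obtain ⟨l, hl⟩ := Option.isSome_iff_exists.mp (List.getLast?_isSome.mpr (List.cons_ne_nil y r))
  simp only [hours_minutes_seconds_to_milliseconds_alt, List.getLast?_cons_cons, hl]
  rw [List.dropLast_cons₂, List.reverse_cons, List.foldl_append,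
      alt_fold_shift, alt_fold_shift, alt_fold_shift]
  simp only [List.map_cons, List.map_nil, List.sum_cons, List.sum_nil]
  ring

lemma agree : ∀ (time_code : List Int) (milliseconds : Int),
    hours_minutes_seconds_to_milliseconds milliseconds time_code =
      hours_minutes_seconds_to_milliseconds_alt milliseconds time_code := by
  intro time_code
  induction time_code with
  | nil => intro ms; rfl
  | cons x rest ih =>
    intro ms
    cases rest with
    | nil =>
      simp [hours_minutes_seconds_to_milliseconds, hours_minutes_seconds_to_milliseconds_alt]
    | cons y r =>
      rw [show hours_minutes_seconds_to_milliseconds ms (x :: y :: r) =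
            hours_minutes_seconds_to_milliseconds (ms + x * 60000) (y :: r) from rfl,
          ih, alt_cons_cons]

-- ===== VERDICT (by name: the statement is the Claim_ definition above) =====
theorem hours_minutes_seconds_to_milliseconds_spec : Claim_equal_hours_minutes_seconds_to_milliseconds := by
  intro milliseconds time_code _
  exact agree time_code milliseconds
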